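-- pv_equiv track=rewrite | github.com/DevAntsa/DevAntsa-Algo-Public | DevAntsa_Lab/RBI_Agents/RBI_Bear/rbi_agent_pp_multi_devantsa_bear_15min.py | parse_idea_fields
-- ===== SOURCE A (Python) =====
-- def parse_idea_fields(idea_block: str) -> dict:
--     """
--     Parse structured [NEW_IDEA] block into fields
--
--     Returns:
--     {
--         'source': 'telegram_pdf' | 'telegram_llm' | 'paper_derived' | 'telegram' | None,
--         'timestamp': '2025-11-10 18:06' | None,
--         'content': 'Strategy description...',
--         'pdf_file': '20251110_180605_ensemble.pdf' | None,
--         'twitter_url': 'https://x.com/...' | None,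
--         'status': 'pending_research' | 'in_progress' | 'completed' | None,
--         'raw': original idea_block string
--     }
--     """
--     fields = {
--         'source': None,
--         'timestamp': None,
--         'content': None,
--         'pdf_file': None,
--         'twitter_url': None,
--         'status': None,
--         'raw': idea_block
--     }
--
--     lines = idea_block.strip().split('\n')
--     for line in lines:
--         line = line.strip()
--         if ':' in line:
--             key, value = line.split(':', 1)
--             key = key.strip().lower()
--             value = value.strip()
--
--             if key == 'source':
--                 fields['source'] = value
--             elif key == 'timestamp':
--                 fields['timestamp'] = value
--             elif key == 'content':
--                 fields['content'] = value
--             elif key == 'pdf_file':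
--                 fields['pdf_file'] = value
--             elif key == 'twitter_url':
--                 fields['twitter_url'] = value
--             elif key == 'status':
--                 fields['status'] = value
--
--     # If content is still None, use entire block as content (fallback for unstructured ideas)
--     if fields['content'] is None:
--         fields['content'] = idea_block.strip()
--
--     return fields
-- ===== SOURCE B (Python) =====
-- def parse_idea_fields(idea_block: str) -> dict:
--     """Per-field backward search: for each known field, scan the lines in
--     reverse order and return the value of the first colon-separated line whose key matches (first match in reverse order = last occurrence wins)."""
--     lines = idea_block.strip().split('\n')
--
--     def find(key):
--         for raw in reversed(lines):
--             line = raw.strip()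
--             if ':' in line:
--                 k, v = line.split(':', 1)
--                 if k.strip().lower() == key:
--                     return v.strip()
--         return None
--
--     content = find('content')
--     if content is None:
--         content = idea_block.strip()
--
--     return {
--         'source': find('source'),
--         'timestamp': find('timestamp'),
--         'content': content,
--         'pdf_file': find('pdf_file'),
--         'twitter_url': find('twitter_url'),
--         'status': find('status'),
--         'raw': idea_block,
--     }
-- ===== Notes on version B (the rewrite author's own statement) =====
-- stated objective: alternative
-- what changed: B replaces A's single forward pass with six-way if/elif dispatch into a mutable dict by six independent per-field backward scans over the lines: each field is the value of the first colon-separated line in reversed order whose normalized key matches (equivalent to A's last-wins overwriting), with the same content fallback.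
import Mathlib
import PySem

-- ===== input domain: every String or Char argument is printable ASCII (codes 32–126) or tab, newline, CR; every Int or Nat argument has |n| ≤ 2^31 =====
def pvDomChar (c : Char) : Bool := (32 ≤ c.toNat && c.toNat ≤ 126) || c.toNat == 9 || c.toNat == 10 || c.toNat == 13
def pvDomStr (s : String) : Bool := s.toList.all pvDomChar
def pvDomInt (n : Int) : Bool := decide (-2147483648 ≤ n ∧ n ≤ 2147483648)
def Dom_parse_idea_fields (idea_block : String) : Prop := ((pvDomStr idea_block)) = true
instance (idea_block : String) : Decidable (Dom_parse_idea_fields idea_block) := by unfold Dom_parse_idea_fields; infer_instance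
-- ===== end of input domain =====

-- B replaces A's single forward pass (if/elif dispatch into a mutable dict, last write wins) by six
-- independent backward scans: each field is the first matching line in reversed order; objective:
-- alternative. Same return value; neither version mutates its argument.

-- ===== PORT A =====
-- the if/elif chain of A's loop body, acting on the pre-initialised fields dict
def pvSixStep (d : PySem.Dict String (Option String)) (key value : String) :
    PySem.Dict String (Option String) :=
  if key == "source" then d.insert "source" (some value)
  else if key == "timestamp" then d.insert "timestamp" (some value)
  else if key == "content" then d.insert "content" (some value)
  else if key == "pdf_file" then d.insert "pdf_file" (some value)
  else if key == "twitter_url" then d.insert "twitter_url" (some value)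
  else if key == "status" then d.insert "status" (some value)
  else d

-- one iteration of A's for-loop (the `_ => d` match arm is unreachable: with ':' in line,
-- split(':', 1) always yields exactly two pieces)
def pvStepA (d : PySem.Dict String (Option String)) (rawline : String) :
    PySem.Dict String (Option String) :=
  let line := PySem.Str.strip rawline
  if PySem.Str.isIn ":" line then
    match PySem.Str.splitMax? line ":" 1 with
    | some (key :: value :: _) =>
        pvSixStep d (PySem.Str.lower (PySem.Str.strip key)) (PySem.Str.strip value)
    | _ => d
  else d

def parse_idea_fields (idea_block : String) : List (String × Option String) :=
  let fields : PySem.Dict String (Option String) :=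
    PySem.Dict.ofList [("source", none), ("timestamp", none), ("content", none),
      ("pdf_file", none), ("twitter_url", none), ("status", none), ("raw", some idea_block)]
  -- split('\n'): the separator is the non-empty literal "\n", so split? is always some;
  -- getD [] is only a totality guard
  let lines := (PySem.Str.split? (PySem.Str.strip idea_block) "\n").getD []
  let fields := lines.foldl pvStepA fields
  let fields :=
    if fields.getD "content" none == none then
      fields.insert "content" (some (PySem.Str.strip idea_block))
    else fields
  fields.items

-- ===== PORT B =====
-- B's find(key): scan the (already reversed) line list, return the value of the first
-- line whose stripped, lowercased key equals `key`
def pvFindB : List String → String → Option String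
  | [], _ => none
  | raw :: rest, key =>
    let line := PySem.Str.strip raw
    if PySem.Str.isIn ":" line then
      match PySem.Str.splitMax? line ":" 1 with
      | some (k :: v :: _) =>
          if PySem.Str.lower (PySem.Str.strip k) == key then some (PySem.Str.strip v)
          else pvFindB rest key
      | _ => pvFindB rest key
    else pvFindB rest key

def parse_idea_fields_alt (idea_block : String) : List (String × Option String) :=
  let lines := (PySem.Str.split? (PySem.Str.strip idea_block) "\n").getD []
  let find := fun key => pvFindB lines.reverse key
  let content :=
    match find "content" with
    | none => PySem.Str.strip idea_block
    | some v => v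
  [("source", find "source"), ("timestamp", find "timestamp"), ("content", some content),
   ("pdf_file", find "pdf_file"), ("twitter_url", find "twitter_url"), ("status", find "status"),
   ("raw", some idea_block)]

-- ===== PRECONDITION & SPEC =====
def Spec_parse_idea_fields (idea_block : String) (out : List (String × Option String)) : Prop := out = parse_idea_fields_alt idea_block
instance (idea_block : String) (out : List (String × Option String)) : Decidable (Spec_parse_idea_fields idea_block out) := by unfold Spec_parse_idea_fields; infer_instance

-- ===== CLAIM =====
def Claim_equal_parse_idea_fields : Prop := ∀ (idea_block : String), Dom_parse_idea_fields idea_block → Spec_parse_idea_fields idea_block (parse_idea_fields idea_block)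

-- ===== LEMMAS AND PROOFS =====

-- "override": a later write (the Option on the left, found while scanning backwards) shadows the
-- earlier state x
def pvOvr (o x : Option String) : Option String :=
  match o with
  | some v => some v
  | none => x

-- A's seven-slot dict, with each slot's value abstracted
def pvMkD (x1 x2 x3 x4 x5 x6 x7 : Option String) : PySem.Dict String (Option String) :=
  PySem.Dict.mk [("source", x1), ("timestamp", x2), ("content", x3),
    ("pdf_file", x4), ("twitter_url", x5), ("status", x6), ("raw", x7)]

lemma pvSixStep_mkD (x1 x2 x3 x4 x5 x6 x7 : Option String) (k v : String) :
    pvSixStep (pvMkD x1 x2 x3 x4 x5 x6 x7) k v =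
      if k = "source" then pvMkD (some v) x2 x3 x4 x5 x6 x7
      else if k = "timestamp" then pvMkD x1 (some v) x3 x4 x5 x6 x7
      else if k = "content" then pvMkD x1 x2 (some v) x4 x5 x6 x7
      else if k = "pdf_file" then pvMkD x1 x2 x3 (some v) x5 x6 x7
      else if k = "twitter_url" then pvMkD x1 x2 x3 x4 (some v) x6 x7
      else if k = "status" then pvMkD x1 x2 x3 x4 x5 (some v) x7
      else pvMkD x1 x2 x3 x4 x5 x6 x7 := by
  by_cases h1 : k = "source"
  · subst h1; simp [pvSixStep, pvMkD, PySem.Dict.insert, PySem.Dict.contains]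
  · by_cases h2 : k = "timestamp"
    · subst h2; simp [pvSixStep, pvMkD, PySem.Dict.insert, PySem.Dict.contains]
    · by_cases h3 : k = "content"
      · subst h3; simp [pvSixStep, pvMkD, PySem.Dict.insert, PySem.Dict.contains]
      · by_cases h4 : k = "pdf_file"
        · subst h4; simp [pvSixStep, pvMkD, PySem.Dict.insert, PySem.Dict.contains]
        · by_cases h5 : k = "twitter_url"
          · subst h5; simp [pvSixStep, pvMkD, PySem.Dict.insert, PySem.Dict.contains]
          · by_cases h6 : k = "status"
            · subst h6; simp [pvSixStep, pvMkD, PySem.Dict.insert, PySem.Dict.contains]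
            · simp [pvSixStep, h1, h2, h3, h4, h5, h6]

-- the ':' membership test, pushed through the String→List Char bridge
lemma pvIsInColon (l : String) :
    PySem.Str.isIn ":" (PySem.Str.strip l) = PySem.Chars.isIn [':'] (PySem.Chars.strip l.toList) := by
  simp [PySem.Str.isIn, PySem.Str.strip]

-- one A-step affects each slot exactly as a one-line backward search would
lemma pvStepA_mkD (l : String) (x1 x2 x3 x4 x5 x6 x7 : Option String) :
    pvStepA (pvMkD x1 x2 x3 x4 x5 x6 x7) l =
      pvMkD (pvOvr (pvFindB [l] "source") x1) (pvOvr (pvFindB [l] "timestamp") x2)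
        (pvOvr (pvFindB [l] "content") x3) (pvOvr (pvFindB [l] "pdf_file") x4)
        (pvOvr (pvFindB [l] "twitter_url") x5) (pvOvr (pvFindB [l] "status") x6) x7 := by
  unfold pvStepA
  by_cases hc : PySem.Str.isIn ":" (PySem.Str.strip l) = true
  · simp only [hc, if_pos]
    cases hsp : PySem.Str.splitMax? (PySem.Str.strip l) ":" 1 with
    | none => simp [pvFindB, pvIsInColon l ▸ hc, hsp, pvOvr]
    | some parts =>
      match parts with
      | [] => simp [pvFindB, pvIsInColon l ▸ hc, hsp, pvOvr]
      | [k0] => simp [pvFindB, pvIsInColon l ▸ hc, hsp, pvOvr]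
      | k0 :: v0 :: restp =>
        dsimp only
        rw [pvSixStep_mkD]
        by_cases e1 : PySem.Str.lower (PySem.Str.strip k0) = "source"
        · simp [pvFindB, pvIsInColon l ▸ hc, hsp, e1, pvOvr]
        · by_cases e2 : PySem.Str.lower (PySem.Str.strip k0) = "timestamp"
          · simp [pvFindB, pvIsInColon l ▸ hc, hsp, e2, pvOvr]
          · by_cases e3 : PySem.Str.lower (PySem.Str.strip k0) = "content"
            · simp [pvFindB, pvIsInColon l ▸ hc, hsp, e3, pvOvr]
            · by_cases e4 : PySem.Str.lower (PySem.Str.strip k0) = "pdf_file"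
              · simp [pvFindB, pvIsInColon l ▸ hc, hsp, e4, pvOvr]
              · by_cases e5 : PySem.Str.lower (PySem.Str.strip k0) = "twitter_url"
                · simp [pvFindB, pvIsInColon l ▸ hc, hsp, e5, pvOvr]
                · by_cases e6 : PySem.Str.lower (PySem.Str.strip k0) = "status"
                  · simp [pvFindB, pvIsInColon l ▸ hc, hsp, e6, pvOvr]
                  · simp [pvFindB, pvIsInColon l ▸ hc, hsp, e1, e2, e3, e4, e5, e6, pvOvr]
  · simp [pvFindB, pvIsInColon l ▸ hc, pvOvr]

-- a one-step unfolding of the backward search, phrased with pvOvr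
lemma pvFindB_cons (l : String) (rest : List String) (key : String) :
    pvFindB (l :: rest) key = pvOvr (pvFindB [l] key) (pvFindB rest key) := by
  by_cases hc : PySem.Str.isIn ":" (PySem.Str.strip l) = true
  · cases hsp : PySem.Str.splitMax? (PySem.Str.strip l) ":" 1 with
    | none => simp [pvFindB, pvIsInColon l ▸ hc, hsp, pvOvr]
    | some parts =>
      match parts with
      | [] => simp [pvFindB, pvIsInColon l ▸ hc, hsp, pvOvr]
      | [k0] => simp [pvFindB, pvIsInColon l ▸ hc, hsp, pvOvr]
      | k0 :: v0 :: restp =>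
        by_cases he : PySem.Str.lower (PySem.Str.strip k0) = key
        · simp [pvFindB, pvIsInColon l ▸ hc, hsp, he, pvOvr]
        · simp [pvFindB, pvIsInColon l ▸ hc, hsp, he, pvOvr]
  · simp [pvFindB, pvIsInColon l ▸ hc, pvOvr]

lemma pvOvr_none (o : Option String) : pvOvr o none = o := by
  cases o <;> simp [pvOvr]

lemma pvOvr_assoc' (a b x : Option String) : pvOvr (pvOvr a b) x = pvOvr a (pvOvr b x) := by
  cases a <;> cases b <;> simp [pvOvr]

-- a backward search over xs ++ ys: first look in xs, then in ys
lemma pvFindB_append (xs ys : List String) (key : String) :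
    pvFindB (xs ++ ys) key = pvOvr (pvFindB xs key) (pvFindB ys key) := by
  induction xs with
  | nil => simp [pvFindB, pvOvr]
  | cons l rest ih =>
    rw [List.cons_append, pvFindB_cons, ih, pvFindB_cons l rest key, pvOvr_assoc']

-- main invariant: A's forward fold over its fixed-slot dict equals, slot by slot, B's backward
-- search over the reversed line list applied over the initial slot values
lemma pvLoopA_find (lines : List String) :
    ∀ (x1 x2 x3 x4 x5 x6 x7 : Option String),
    lines.foldl pvStepA (pvMkD x1 x2 x3 x4 x5 x6 x7) =
      pvMkD (pvOvr (pvFindB lines.reverse "source") x1) (pvOvr (pvFindB lines.reverse "timestamp") x2)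
        (pvOvr (pvFindB lines.reverse "content") x3) (pvOvr (pvFindB lines.reverse "pdf_file") x4)
        (pvOvr (pvFindB lines.reverse "twitter_url") x5) (pvOvr (pvFindB lines.reverse "status") x6) x7 := by
  induction lines with
  | nil => intro x1 x2 x3 x4 x5 x6 x7; simp [pvFindB, pvOvr]
  | cons l rest ih =>
    intro x1 x2 x3 x4 x5 x6 x7
    simp only [List.foldl_cons, List.reverse_cons]
    rw [pvStepA_mkD, ih]
    simp only [pvFindB_append, pvOvr_assoc']

-- ===== VERDICT =====
theorem parse_idea_fields_spec : Claim_equal_parse_idea_fields := by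
  intro s _
  unfold Spec_parse_idea_fields
  simp only [parse_idea_fields, parse_idea_fields_alt]
  have hinit : PySem.Dict.ofList [("source", (none : Option String)), ("timestamp", none),
      ("content", none), ("pdf_file", none), ("twitter_url", none), ("status", none),
      ("raw", some s)] = pvMkD none none none none none none (some s) := by
    simp [PySem.Dict.ofList, PySem.Dict.update, PySem.Dict.insert, PySem.Dict.contains,
      PySem.Dict.empty, pvMkD]
  rw [hinit, pvLoopA_find _ none none none none none none (some s)]
  set lines := (PySem.Str.split? (PySem.Str.strip s) "\n").getD []
  cases hq : pvFindB lines.reverse "content" with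
  | none =>
    simp [pvMkD, pvOvr_none, PySem.Dict.getD, PySem.Dict.get?, PySem.Dict.insert,
      PySem.Dict.contains]
  | some v =>
    simp [pvMkD, pvOvr_none, PySem.Dict.getD, PySem.Dict.get?]
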